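-- pv_equiv track=rewrite | github.com/Kurtis24/Terrahacks-Hackathon | backend/algo_v2.py | find_snake_midpoint
-- ===== SOURCE A (Python) =====
-- def find_snake_midpoint(collision_x, collision_y, occupied_points):
--     """
--     Find the midpoint between the current snake position and the nearest other snake position
--
--     Args:
--         collision_x, collision_y: Current snake collision coordinates
--         occupied_points: Set of all occupied points from both snakes
--
--     Returns:
--         Tuple of (midpoint_x, midpoint_y) coordinates
--     """
--     if not occupied_points:
--         return collision_x, collision_y
--
--     # Find the nearest occupied point (from the other snake) within a small radius
--     search_radius = 3
--     nearest_distance = float('inf')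
--     nearest_point = None
--
--     for x in range(collision_x - search_radius, collision_x + search_radius + 1):
--         for y in range(collision_y - search_radius, collision_y + search_radius + 1):
--             if (x, y) in occupied_points and (x, y) != (collision_x, collision_y):
--                 distance = abs(x - collision_x) + abs(y - collision_y)  # Manhattan distance
--                 if distance < nearest_distance:
--                     nearest_distance = distance
--                     nearest_point = (x, y)
--
--     if nearest_point:
--         # Calculate midpoint between collision point and nearest other snake point
--         other_x, other_y = nearest_point
--         midpoint_x = (collision_x + other_x) // 2
--         midpoint_y = (collision_y + other_y) // 2
--         return midpoint_x, midpoint_y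
--     else:
--         # If no nearby point found, use the collision point
--         return collision_x, collision_y
-- ===== SOURCE B (Python) =====
-- def find_snake_midpoint(collision_x, collision_y, occupied_points):
--     """Single pass over occupied_points instead of scanning the 7x7 grid box;
--     the min key (distance, x, y) reproduces the scan-order tie-break."""
--     if not occupied_points:
--         return collision_x, collision_y
--     best = None
--     for (x, y) in occupied_points:
--         if abs(x - collision_x) <= 3 and abs(y - collision_y) <= 3 and (x, y) != (collision_x, collision_y):
--             key = (abs(x - collision_x) + abs(y - collision_y), x, y)
--             if best is None or key < best:
--                 best = key
--     if best is None:
--         return collision_x, collision_y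
--     _, ox, oy = best
--     return (collision_x + ox) // 2, (collision_y + oy) // 2
-- ===== Notes on version B (the rewrite author's own statement) =====
-- stated objective: simpler
-- what changed: B replaces A's 7x7 grid-box scan with membership tests by a single pass over occupied_points itself, selecting the minimum of the key (manhattan distance, x, y), which reproduces A's scan-order tie-break exactly.
import Mathlib
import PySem

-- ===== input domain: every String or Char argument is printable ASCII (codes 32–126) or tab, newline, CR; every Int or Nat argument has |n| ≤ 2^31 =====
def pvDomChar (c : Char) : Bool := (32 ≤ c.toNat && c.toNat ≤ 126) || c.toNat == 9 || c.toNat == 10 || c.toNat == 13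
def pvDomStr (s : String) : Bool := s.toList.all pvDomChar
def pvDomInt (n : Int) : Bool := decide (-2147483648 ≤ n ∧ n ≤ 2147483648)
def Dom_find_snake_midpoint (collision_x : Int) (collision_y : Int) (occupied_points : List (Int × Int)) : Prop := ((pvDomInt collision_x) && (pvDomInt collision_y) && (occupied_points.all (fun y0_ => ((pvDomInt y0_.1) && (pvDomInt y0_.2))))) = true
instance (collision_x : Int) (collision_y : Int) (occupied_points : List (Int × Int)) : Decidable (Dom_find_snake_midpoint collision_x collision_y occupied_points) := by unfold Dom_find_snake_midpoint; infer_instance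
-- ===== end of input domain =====

-- B scans occupied_points once with the min key (distance, x, y) instead of A's 7x7 grid-box scan with membership tests (objective: simpler).


-- ===== PORT A =====
-- float('inf') is modelled by (none : Option Int); a fresh distance always beats it, exactly as in Python.
def find_snake_midpoint (collision_x : Int) (collision_y : Int) (occupied_points : List (Int × Int)) : Int × Int :=
  if occupied_points = [] then (collision_x, collision_y)
  else
    let search_radius : Int := 3
    let st :=
      (PySem.List.pyRange (collision_x - search_radius) (collision_x + search_radius + 1) 1).foldl
        (fun s x =>
          (PySem.List.pyRange (collision_y - search_radius) (collision_y + search_radius + 1) 1).foldl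
            (fun s y =>
              if (x, y) ∈ occupied_points ∧ (x, y) ≠ (collision_x, collision_y) then
                let distance := |x - collision_x| + |y - collision_y|
                match s.1 with
                | none => (some distance, some (x, y))
                | some nd => if distance < nd then (some distance, some (x, y)) else s
              else s)
            s)
        ((none : Option Int), (none : Option (Int × Int)))
    match st.2 with
    | some (ox, oy) =>
        (PySem.Int.floordiv (collision_x + ox) 2, PySem.Int.floordiv (collision_y + oy) 2)
    | none => (collision_x, collision_y)

-- ===== PORT B =====
-- Python tuple comparison key < best on (Int, Int, Int) triples
def keyLt (a b : Int × Int × Int) : Bool :=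
  decide (a.1 < b.1) || (decide (a.1 = b.1) && (decide (a.2.1 < b.2.1) || (decide (a.2.1 = b.2.1) && decide (a.2.2 < b.2.2))))

def find_snake_midpoint_alt (collision_x : Int) (collision_y : Int) (occupied_points : List (Int × Int)) : Int × Int :=
  if occupied_points = [] then (collision_x, collision_y)
  else
    let best :=
      occupied_points.foldl
        (fun b p =>
          if |p.1 - collision_x| ≤ 3 ∧ |p.2 - collision_y| ≤ 3 ∧ p ≠ (collision_x, collision_y) then
            let k : Int × Int × Int := (|p.1 - collision_x| + |p.2 - collision_y|, p.1, p.2)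
            match b with
            | none => some k
            | some bk => if keyLt k bk then some k else b
          else b)
        (none : Option (Int × Int × Int))
    match best with
    | some (_, ox, oy) =>
        (PySem.Int.floordiv (collision_x + ox) 2, PySem.Int.floordiv (collision_y + oy) 2)
    | none => (collision_x, collision_y)

-- ===== PRECONDITION & SPEC =====
def Spec_find_snake_midpoint (collision_x : Int) (collision_y : Int) (occupied_points : List (Int × Int)) (out : Int × Int) : Prop := out = find_snake_midpoint_alt collision_x collision_y occupied_points
instance (collision_x : Int) (collision_y : Int) (occupied_points : List (Int × Int)) (out : Int × Int) : Decidable (Spec_find_snake_midpoint collision_x collision_y occupied_points out) := by unfold Spec_find_snake_midpoint; infer_instance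

-- ===== CLAIM (what is proved, stated in full; the proofs are below) =====
def Claim_equal_find_snake_midpoint : Prop := ∀ (collision_x : Int) (collision_y : Int) (occupied_points : List (Int × Int)), Dom_find_snake_midpoint collision_x collision_y occupied_points → Spec_find_snake_midpoint collision_x collision_y occupied_points (find_snake_midpoint collision_x collision_y occupied_points)

-- ===== LEMMAS AND PROOFS =====

-- the key of a point relative to the collision cell
def pvK (cx cy : Int) (p : Int × Int) : Int × Int × Int := (|p.1 - cx| + |p.2 - cy|, p.1, p.2)

-- generic "min by key" fold step with Boolean guard Q
def pvStepK (cx cy : Int) (Q : Int × Int → Bool)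
    (b : Option (Int × Int × Int)) (p : Int × Int) : Option (Int × Int × Int) :=
  if Q p then
    match b with
    | none => some (pvK cx cy p)
    | some bk => if keyLt (pvK cx cy p) bk then some (pvK cx cy p) else b
  else b

-- A's loop body, on a point
def pvStepA (cx cy : Int) (occ : List (Int × Int))
    (s : Option Int × Option (Int × Int)) (p : Int × Int) : Option Int × Option (Int × Int) :=
  if p ∈ occ ∧ p ≠ (cx, cy) then
    match s.1 with
    | none => (some (|p.1 - cx| + |p.2 - cy|), some p)
    | some nd => if |p.1 - cx| + |p.2 - cy| < nd then (some (|p.1 - cx| + |p.2 - cy|), some p) else s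
  else s

def plex (p q : Int × Int) : Prop := p.1 < q.1 ∨ (p.1 = q.1 ∧ p.2 < q.2)

def pvQa (cx cy : Int) (occ : List (Int × Int)) (p : Int × Int) : Bool :=
  decide (p ∈ occ ∧ p ≠ (cx, cy))
def pvQb (cx cy : Int) (p : Int × Int) : Bool :=
  decide (|p.1 - cx| ≤ 3 ∧ |p.2 - cy| ≤ 3 ∧ p ≠ (cx, cy))

def pvCells (cx cy : Int) : List (Int × Int) :=
  (PySem.List.pyRange (cx - 3) (cx + 3 + 1) 1).flatMap
    (fun x => (PySem.List.pyRange (cy - 3) (cy + 3 + 1) 1).map (fun y => (x, y)))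

-- basic facts about the strict lexicographic key order
theorem keyLt_irrefl (a : Int × Int × Int) : keyLt a a = false := by
  simp [keyLt]

theorem keyLt_asymm {a b : Int × Int × Int} (h : keyLt a b = true) : keyLt b a = false := by
  obtain ⟨a1, a2, a3⟩ := a; obtain ⟨b1, b2, b3⟩ := b
  simp only [keyLt] at h ⊢
  simp at h ⊢
  omega

theorem keyLe_trans {a b c : Int × Int × Int} (h1 : keyLt a b = false) (h2 : keyLt b c = false) :
    keyLt a c = false := by
  obtain ⟨a1, a2, a3⟩ := a; obtain ⟨b1, b2, b3⟩ := b; obtain ⟨c1, c2, c3⟩ := c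
  simp only [keyLt] at h1 h2 ⊢
  simp at h1 h2 ⊢
  omega

theorem keyLt_antisymm {a b : Int × Int × Int} (h1 : keyLt a b = false) (h2 : keyLt b a = false) :
    a = b := by
  obtain ⟨a1, a2, a3⟩ := a; obtain ⟨b1, b2, b3⟩ := b
  simp only [keyLt] at h1 h2
  simp at h1 h2
  simp only [Prod.mk.injEq]
  omega

-- folding a nested loop over a product list
theorem foldl_flatMap_map {σ : Type} (xs ys : List Int) (g : σ → Int × Int → σ) :
    ∀ (init : σ),
      ((xs.flatMap fun x => ys.map fun y => ((x, y) : Int × Int)).foldl g init) =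
        xs.foldl (fun s x => ys.foldl (fun s y => g s (x, y)) s) init := by
  induction xs with
  | nil => intro init; simp
  | cons x xs ih =>
    intro init
    simp only [List.flatMap_cons, List.foldl_append, List.foldl_cons, List.foldl_map, ih]

-- the step keeps a some-accumulator some
theorem stepK_some (cx cy : Int) (Q : Int × Int → Bool) (m : Int × Int × Int) (p : Int × Int) :
    ∃ m', pvStepK cx cy Q (some m) p = some m' ∧ keyLt m m' = false := by
  by_cases hq : Q p = true
  · by_cases hlt : keyLt (pvK cx cy p) m = true
    · exact ⟨pvK cx cy p, by simp [pvStepK, hq, hlt], keyLt_asymm hlt⟩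
    · have hlt' : keyLt (pvK cx cy p) m = false := by
        revert hlt; cases keyLt (pvK cx cy p) m <;> simp
      exact ⟨m, by simp [pvStepK, hq, hlt'], keyLt_irrefl m⟩
  · have hq' : Q p = false := by revert hq; cases Q p <;> simp
    exact ⟨m, by simp [pvStepK, hq'], keyLt_irrefl m⟩

-- characterisation of the min-by-key fold
theorem foldK_none_iff (cx cy : Int) (Q : Int × Int → Bool) :
    ∀ (l : List (Int × Int)) (b : Option (Int × Int × Int)),
      l.foldl (pvStepK cx cy Q) b = none ↔ (b = none ∧ ∀ p ∈ l, Q p = false) := by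
  intro l
  induction l with
  | nil => intro b; simp
  | cons h t ih =>
    intro b
    rw [List.foldl_cons, ih]
    cases b with
    | some bk =>
      obtain ⟨m', hm', _⟩ := stepK_some cx cy Q bk h
      rw [hm']
      simp
    | none =>
      by_cases hq : Q h = true
      · have hstep : pvStepK cx cy Q none h = some (pvK cx cy h) := by simp [pvStepK, hq]
        rw [hstep]
        simp [hq]
      · have hq' : Q h = false := by revert hq; cases Q h <;> simp
        have hstep : pvStepK cx cy Q none h = none := by simp [pvStepK, hq']
        rw [hstep]
        simp [hq']

theorem foldK_some_mem (cx cy : Int) (Q : Int × Int → Bool) :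
    ∀ (l : List (Int × Int)) (b : Option (Int × Int × Int)) (k : Int × Int × Int),
      l.foldl (pvStepK cx cy Q) b = some k →
        (b = some k ∨ ∃ p ∈ l, Q p = true ∧ k = pvK cx cy p) := by
  intro l
  induction l with
  | nil => intro b k h; simp at h; exact Or.inl h
  | cons h t ih =>
    intro b k hf
    rw [List.foldl_cons] at hf
    rcases ih _ _ hf with hb' | ⟨p, hp, hQp, hk⟩
    · by_cases hq : Q h = true
      · cases b with
        | none =>
          simp [pvStepK, hq] at hb'
          exact Or.inr ⟨h, List.mem_cons_self .., hq, hb'.symm⟩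
        | some bk =>
          simp only [pvStepK, if_pos hq] at hb'
          by_cases hlt : keyLt (pvK cx cy h) bk = true
          · simp only [hlt, if_true] at hb'
            exact Or.inr ⟨h, List.mem_cons_self .., hq, (Option.some_inj.mp hb').symm⟩
          · simp only [hlt] at hb'
            exact Or.inl hb'
      · have hq' : Q h = false := by revert hq; cases Q h <;> simp
        simp [pvStepK, hq'] at hb'
        exact Or.inl (by rw [hb'])
    · exact Or.inr ⟨p, List.mem_cons_of_mem _ hp, hQp, hk⟩

theorem foldK_le (cx cy : Int) (Q : Int × Int → Bool) :
    ∀ (l : List (Int × Int)) (m k : Int × Int × Int),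
      l.foldl (pvStepK cx cy Q) (some m) = some k → keyLt m k = false := by
  intro l
  induction l with
  | nil => intro m k h; simp at h; rw [h]; exact keyLt_irrefl k
  | cons h t ih =>
    intro m k hf
    rw [List.foldl_cons] at hf
    obtain ⟨m', hm', hle⟩ := stepK_some cx cy Q m h
    rw [hm'] at hf
    exact keyLe_trans hle (ih _ _ hf)

theorem foldK_min (cx cy : Int) (Q : Int × Int → Bool) :
    ∀ (l : List (Int × Int)) (b : Option (Int × Int × Int)) (k : Int × Int × Int),
      l.foldl (pvStepK cx cy Q) b = some k →
        ∀ q ∈ l, Q q = true → keyLt (pvK cx cy q) k = false := by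
  intro l
  induction l with
  | nil => intro b k _ q hq; simp at hq
  | cons h t ih =>
    intro b k hf q hq hQq
    rw [List.foldl_cons] at hf
    rcases List.mem_cons.mp hq with rfl | hqt
    · -- q = h : the accumulator after this step is some m not above pvK q
      have hstep : ∃ m, pvStepK cx cy Q b q = some m ∧ keyLt (pvK cx cy q) m = false := by
        cases b with
        | none => exact ⟨pvK cx cy q, by simp [pvStepK, hQq], keyLt_irrefl _⟩
        | some bk =>
          by_cases hlt : keyLt (pvK cx cy q) bk = true
          · exact ⟨pvK cx cy q, by simp [pvStepK, hQq, hlt], keyLt_irrefl _⟩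
          · have hlt' : keyLt (pvK cx cy q) bk = false := by
              revert hlt; cases keyLt (pvK cx cy q) bk <;> simp
            exact ⟨bk, by simp [pvStepK, hQq, hlt'], hlt'⟩
      obtain ⟨m, hm, hle⟩ := hstep
      rw [hm] at hf
      exact keyLe_trans hle (foldK_le cx cy Q t m k hf)
    · exact ih _ _ hf q hqt hQq

-- the invariant tying A's fold state to the min-by-key fold, over a lex-sorted list
def pvInv (cx cy : Int) (l : List (Int × Int)) (s : Option Int × Option (Int × Int))
    (b : Option (Int × Int × Int)) : Prop :=
  (s = (none, none) ∧ b = none) ∨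
  ∃ p, s = (some (|p.1 - cx| + |p.2 - cy|), some p) ∧ b = some (pvK cx cy p) ∧ ∀ q ∈ l, plex p q

theorem fold_rel (cx cy : Int) (occ : List (Int × Int)) :
    ∀ (l : List (Int × Int)), l.Pairwise plex →
      ∀ s b, pvInv cx cy l s b →
        pvInv cx cy [] (l.foldl (pvStepA cx cy occ) s)
          (l.foldl (pvStepK cx cy (pvQa cx cy occ)) b) := by
  intro l
  induction l with
  | nil =>
    intro _ s b hinv
    rcases hinv with h | ⟨p, h1, h2, _⟩
    · exact Or.inl h
    · exact Or.inr ⟨p, h1, h2, by simp⟩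
  | cons h t ih =>
    intro hpw s b hinv
    rcases List.pairwise_cons.mp hpw with ⟨hall, hpw2⟩
    rw [List.foldl_cons, List.foldl_cons]
    refine ih hpw2 _ _ ?_
    by_cases hq : (h ∈ occ ∧ h ≠ (cx, cy))
    · have hqa : pvQa cx cy occ h = true := by simp [pvQa, hq]
      rcases hinv with ⟨hs, hb⟩ | ⟨p, hs, hb, hplex⟩
      · subst hs; subst hb
        refine Or.inr ⟨h, ?_, ?_, hall⟩
        · simp [pvStepA, hq]
        · simp [pvStepK, hqa]
      · subst hs; subst hb
        have hph : plex p h := hplex h (List.mem_cons_self ..)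
        by_cases hd : |h.1 - cx| + |h.2 - cy| < |p.1 - cx| + |p.2 - cy|
        · refine Or.inr ⟨h, ?_, ?_, hall⟩
          · simp [pvStepA, hq, hd]
          · have hlt : keyLt (pvK cx cy h) (pvK cx cy p) = true := by
              obtain ⟨p1, p2⟩ := p; obtain ⟨a1, a2⟩ := h
              simp only [keyLt, pvK]
              simp at hd ⊢
              omega
            simp [pvStepK, hqa, hlt]
        · refine Or.inr ⟨p, ?_, ?_, fun q hqt => hplex q (List.mem_cons_of_mem _ hqt)⟩
          · simp [pvStepA, hq, hd]
          · have hlt : keyLt (pvK cx cy h) (pvK cx cy p) = false := by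
              obtain ⟨p1, p2⟩ := p; obtain ⟨a1, a2⟩ := h
              simp only [plex] at hph
              simp only [keyLt, pvK]
              simp at hph hd ⊢
              omega
            simp [pvStepK, hqa, hlt]
    · have hqa : pvQa cx cy occ h = false := by simp [pvQa]; tauto
      have hsA : pvStepA cx cy occ s h = s := by simp [pvStepA, hq]
      have hsK : pvStepK cx cy (pvQa cx cy occ) b h = b := by simp [pvStepK, hqa]
      rw [hsA, hsK]
      rcases hinv with ⟨hs, hb⟩ | ⟨p, hs, hb, hplex⟩
      · exact Or.inl ⟨hs, hb⟩
      · exact Or.inr ⟨p, hs, hb, fun q hqt => hplex q (List.mem_cons_of_mem _ hqt)⟩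

-- membership and sortedness of the scan box
theorem mem_pvCells (cx cy : Int) (p : Int × Int) :
    p ∈ pvCells cx cy ↔ (|p.1 - cx| ≤ 3 ∧ |p.2 - cy| ≤ 3) := by
  obtain ⟨px, py⟩ := p
  simp only [pvCells, List.mem_flatMap, List.mem_map, PySem.List.mem_pyRange_one, Prod.mk.injEq]
  constructor
  · rintro ⟨x, hx, y, hy, rfl, rfl⟩
    simp only [abs_le]
    omega
  · simp only [abs_le]
    intro hb
    exact ⟨px, by omega, py, by omega, rfl, rfl⟩

theorem pairwise_product (xs ys : List Int) (hx : xs.Pairwise (· < ·)) (hy : ys.Pairwise (· < ·)) :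
    (xs.flatMap fun x => ys.map fun y => ((x, y) : Int × Int)).Pairwise plex := by
  induction xs with
  | nil => simp
  | cons x xs ih =>
    rcases List.pairwise_cons.mp hx with ⟨hxall, hx2⟩
    rw [List.flatMap_cons, List.pairwise_append]
    refine ⟨?_, ih hx2, ?_⟩
    · exact hy.map _ (fun a b hab => Or.inr ⟨rfl, hab⟩)
    · intro a ha b hb
      rcases List.mem_map.mp ha with ⟨y1, _, rfl⟩
      rcases List.mem_flatMap.mp hb with ⟨x2, hx2m, hb2⟩
      rcases List.mem_map.mp hb2 with ⟨y2, _, rfl⟩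
      exact Or.inl (hxall x2 hx2m)

theorem pairwise_pvCells (cx cy : Int) : (pvCells cx cy).Pairwise plex :=
  pairwise_product _ _ (PySem.List.pairwise_lt_pyRange_one ..) (PySem.List.pairwise_lt_pyRange_one ..)

-- A's nested range loop is the fold of pvStepA over the box list
theorem A_fold_eq (cx cy : Int) (occ : List (Int × Int)) (init : Option Int × Option (Int × Int)) :
    (PySem.List.pyRange (cx - 3) (cx + 3 + 1) 1).foldl
      (fun s x =>
        (PySem.List.pyRange (cy - 3) (cy + 3 + 1) 1).foldl
          (fun s y =>
            if (x, y) ∈ occ ∧ (x, y) ≠ (cx, cy) then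
              match s.1 with
              | none => (some (|x - cx| + |y - cy|), some (x, y))
              | some nd => if |x - cx| + |y - cy| < nd then (some (|x - cx| + |y - cy|), some (x, y)) else s
            else s)
          s)
      init = (pvCells cx cy).foldl (pvStepA cx cy occ) init := by
  rw [pvCells, foldl_flatMap_map]
  rfl

-- B's loop body is pvStepK with guard pvQb
theorem B_step_eq (cx cy : Int) :
    (fun (b : Option (Int × Int × Int)) (p : Int × Int) =>
      if |p.1 - cx| ≤ 3 ∧ |p.2 - cy| ≤ 3 ∧ p ≠ (cx, cy) then
        match b with
        | none => some ((|p.1 - cx| + |p.2 - cy|, p.1, p.2) : Int × Int × Int)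
        | some bk => if keyLt (|p.1 - cx| + |p.2 - cy|, p.1, p.2) bk then some (|p.1 - cx| + |p.2 - cy|, p.1, p.2) else b
      else b) = pvStepK cx cy (pvQb cx cy) := by
  funext b p
  by_cases hq : (|p.1 - cx| ≤ 3 ∧ |p.2 - cy| ≤ 3 ∧ p ≠ (cx, cy))
  · have hqb : pvQb cx cy p = true := by simp [pvQb]; tauto
    simp [pvStepK, hqb, pvK, hq]
  · have hqb : pvQb cx cy p = false := by simp [pvQb]; tauto
    simp [pvStepK, hqb, hq]

theorem find_snake_midpoint_spec : Claim_equal_find_snake_midpoint := by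
  intro cx cy occ _hdom
  unfold Spec_find_snake_midpoint
  by_cases hocc : occ = []
  · simp [find_snake_midpoint, find_snake_midpoint_alt, hocc]
  · simp only [find_snake_midpoint, find_snake_midpoint_alt, if_neg hocc]
    rw [A_fold_eq, B_step_eq]
    have hinv := fold_rel cx cy occ (pvCells cx cy) (pairwise_pvCells cx cy)
      ((none : Option Int), (none : Option (Int × Int))) none (Or.inl ⟨rfl, rfl⟩)
    -- relate the two min-by-key folds: same candidate set
    have hQab : ∀ p : Int × Int,
        ((p ∈ pvCells cx cy ∧ pvQa cx cy occ p = true) ↔ (p ∈ occ ∧ pvQb cx cy p = true)) := by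
      intro p
      simp only [pvQa, pvQb, decide_eq_true_eq, mem_pvCells]
      tauto
    cases hKB : occ.foldl (pvStepK cx cy (pvQb cx cy)) none with
    | none =>
      have hall := ((foldK_none_iff cx cy (pvQb cx cy) occ none).mp hKB).2
      have hKA : (pvCells cx cy).foldl (pvStepK cx cy (pvQa cx cy occ)) none = none := by
        rw [foldK_none_iff]
        refine ⟨rfl, fun p hp => ?_⟩
        by_cases hqa : pvQa cx cy occ p = true
        · have := (hQab p).mp ⟨hp, hqa⟩
          rw [hall p this.1] at this
          exact absurd this.2 (by simp)
        · revert hqa; cases pvQa cx cy occ p <;> simp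
      rcases hinv with ⟨hFA, _⟩ | ⟨p, _, hb, _⟩
      · rw [hFA]
      · rw [hKA] at hb; exact absurd hb (by simp)
    | some kB =>
      -- a witness for kB
      have hmemB := foldK_some_mem cx cy (pvQb cx cy) occ none kB hKB
      rcases hmemB with hcon | ⟨q, hqocc, hQbq, hkB⟩
      · exact absurd hcon (by simp)
      have hqcells : q ∈ pvCells cx cy ∧ pvQa cx cy occ q = true := (hQab q).mpr ⟨hqocc, hQbq⟩
      rcases hinv with ⟨_, hKA⟩ | ⟨p, hFA, hKA, _⟩
      · -- KA = none is impossible: q is a candidate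
        have := ((foldK_none_iff cx cy (pvQa cx cy occ) (pvCells cx cy) none).mp hKA).2 q hqcells.1
        rw [hqcells.2] at this
        exact absurd this (by simp)
      · -- both some: the two minima are equal
        have hmemA := foldK_some_mem cx cy (pvQa cx cy occ) (pvCells cx cy) none (pvK cx cy p) hKA
        rcases hmemA with hcon | ⟨p', hp'cells, hQap', hkA⟩
        · exact absurd hcon (by simp)
        have hp'occ : p' ∈ occ ∧ pvQb cx cy p' = true := (hQab p').mp ⟨hp'cells, hQap'⟩
        have h1 : keyLt (pvK cx cy q) (pvK cx cy p) = false :=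
          foldK_min cx cy (pvQa cx cy occ) (pvCells cx cy) none (pvK cx cy p) hKA q hqcells.1 hqcells.2
        have h2 : keyLt (pvK cx cy p') kB = false :=
          foldK_min cx cy (pvQb cx cy) occ none kB hKB p' hp'occ.1 hp'occ.2
        have hkApk : keyLt (pvK cx cy p) kB = false := hkA ▸ h2
        have hkBpk : keyLt kB (pvK cx cy p) = false := hkB ▸ h1
        have hEq : pvK cx cy p = kB := keyLt_antisymm hkApk hkBpk
        rw [hFA, ← hEq]
        simp [pvK]
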